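-- pv_equiv track=rewrite | github.com/nadzyah/ctu13-dataset-analyser | ctu13_dataset_analyser/utils/binetflow_parser.py | _classify_session_label
-- ===== SOURCE A (Python) =====
-- from typing import List, Dict, Any, Tuple, Set, Optional, Generator
--
-- def _classify_session_label(labels: Set[str]) -> Tuple[str, Dict[str, int]]:
--     """
--     Determine the session label based on the set of labels from multiple flows.
--     Uses precedence: C&C > Botnet > Normal > Background
--
--     Args:
--         labels: Set of labels from all flows in the session
--
--     Returns:
--         Tuple of (session_label, is_flags_dict)
--     """
--     # Check for prioritized labels in order of precedence
--     has_cc = any("CC" in label or "C&C" in label for label in labels)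
--     has_botnet = any("Botnet" in label for label in labels)
--
--     # Check for normal traffic markers
--     has_normal = any(
--         (
--             "LEGITIMATE" in label
--             or "normal" in label.lower()
--             or "Normal" in label
--             or "From-Normal" in label
--         )
--         for label in labels
--     )
--
--     if has_cc:
--         session_label = "command-and-control"
--         is_flags = {"is_botnet": 0, "is_normal": 0, "is_cc": 1, "is_background": 0}
--     elif has_botnet:
--         session_label = "botnet"
--         is_flags = {"is_botnet": 1, "is_normal": 0, "is_cc": 0, "is_background": 0}
--     elif has_normal:
--         session_label = "normal"
--         is_flags = {"is_botnet": 0, "is_normal": 1, "is_cc": 0, "is_background": 0}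
--     else:
--         session_label = "background"
--         is_flags = {"is_botnet": 0, "is_normal": 0, "is_cc": 0, "is_background": 1}
--
--     return session_label, is_flags
-- ===== SOURCE B (Python) =====
-- def _classify_session_label(labels):
--     # Rank each label numerically (3=C&C, 2=Botnet, 1=Normal, 0=Background),
--     # take the maximum rank over all labels, and index into outcome tables.
--     def rank(label):
--         if "CC" in label or "C&C" in label:
--             return 3
--         if "Botnet" in label:
--             return 2
--         if ("LEGITIMATE" in label or "normal" in label.lower()
--                 or "Normal" in label or "From-Normal" in label):
--             return 1
--         return 0
--
--     best = max(map(rank, labels), default=0)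
--     names = ["background", "normal", "botnet", "command-and-control"]
--     keys = ["is_background", "is_normal", "is_botnet", "is_cc"]
--     is_flags = {"is_botnet": 0, "is_normal": 0, "is_cc": 0, "is_background": 0}
--     is_flags[keys[best]] = 1
--     return names[best], is_flags
-- ===== Notes on version B (the rewrite author's own statement) =====
-- stated objective: alternative
-- what changed: Replaces A's three boolean any(...) scans and if/elif precedence chain with a numeric rank per label (3=C&C,2=Botnet,1=Normal,0=Background), a single max over the labels, and table lookup of the name and of the flag key to set.
import Mathlib
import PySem

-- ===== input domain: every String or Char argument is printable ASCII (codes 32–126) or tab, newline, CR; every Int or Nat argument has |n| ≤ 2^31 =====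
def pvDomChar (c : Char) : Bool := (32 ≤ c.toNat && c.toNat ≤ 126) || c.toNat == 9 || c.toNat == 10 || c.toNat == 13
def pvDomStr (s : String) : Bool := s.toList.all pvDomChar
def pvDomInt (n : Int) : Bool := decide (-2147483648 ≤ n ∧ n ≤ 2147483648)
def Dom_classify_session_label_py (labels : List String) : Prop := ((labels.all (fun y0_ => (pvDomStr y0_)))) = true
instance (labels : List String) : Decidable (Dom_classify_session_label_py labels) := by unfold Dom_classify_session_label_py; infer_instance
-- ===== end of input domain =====

-- B replaces A's three boolean any(...) scans and precedence chain by a numeric rank per label,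
-- a single max over the labels, and table lookup of the outcome (objective: alternative).

-- ===== PORT A =====
def classify_session_label_py (labels : List String) : String × (List (String × Int)) :=
  let has_cc := labels.any (fun label => PySem.Str.isIn "CC" label || PySem.Str.isIn "C&C" label)
  let has_botnet := labels.any (fun label => PySem.Str.isIn "Botnet" label)
  let has_normal := labels.any (fun label =>
    PySem.Str.isIn "LEGITIMATE" label || PySem.Str.isIn "normal" (PySem.Str.lower label)
      || PySem.Str.isIn "Normal" label || PySem.Str.isIn "From-Normal" label)
  if has_cc then
    ("command-and-control", [("is_botnet", 0), ("is_normal", 0), ("is_cc", 1), ("is_background", 0)])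
  else if has_botnet then
    ("botnet", [("is_botnet", 1), ("is_normal", 0), ("is_cc", 0), ("is_background", 0)])
  else if has_normal then
    ("normal", [("is_botnet", 0), ("is_normal", 1), ("is_cc", 0), ("is_background", 0)])
  else
    ("background", [("is_botnet", 0), ("is_normal", 0), ("is_cc", 0), ("is_background", 1)])

-- ===== PORT B =====
-- rank: 3 = C&C, 2 = Botnet, 1 = Normal, 0 = Background
def pvRank (label : String) : Nat :=
  if PySem.Str.isIn "CC" label || PySem.Str.isIn "C&C" label then 3
  else if PySem.Str.isIn "Botnet" label then 2
  else if PySem.Str.isIn "LEGITIMATE" label || PySem.Str.isIn "normal" (PySem.Str.lower label)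
      || PySem.Str.isIn "Normal" label || PySem.Str.isIn "From-Normal" label then 1
  else 0

def classify_session_label_py_alt (labels : List String) : String × (List (String × Int)) :=
  let best := labels.foldl (fun m l => max m (pvRank l)) 0   -- max(map(rank, labels), default=0)
  let names := ["background", "normal", "botnet", "command-and-control"]
  let keys := ["is_background", "is_normal", "is_botnet", "is_cc"]
  let is_flags : PySem.Dict String Int :=
    PySem.Dict.ofList [("is_botnet", 0), ("is_normal", 0), ("is_cc", 0), ("is_background", 0)]
  ((names.getD best ""), (is_flags.insert (keys.getD best "") 1).items)

-- ===== PRECONDITION & SPEC =====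
def Spec_classify_session_label_py (labels : List String) (out : String × (List (String × Int))) : Prop := out = classify_session_label_py_alt labels
instance (labels : List String) (out : String × (List (String × Int))) : Decidable (Spec_classify_session_label_py labels out) := by unfold Spec_classify_session_label_py; infer_instance

-- ===== CLAIM (what is proved, stated in full; the proofs are below) =====
def Claim_equal_classify_session_label_py : Prop := ∀ (labels : List String), Dom_classify_session_label_py labels → Spec_classify_session_label_py labels (classify_session_label_py labels)

-- ===== LEMMAS AND PROOFS =====
-- closed form of B's max accumulator in terms of A's three scans
def pvR (labels : List String) : Nat :=
  if labels.any (fun label => PySem.Str.isIn "CC" label || PySem.Str.isIn "C&C" label) then 3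
  else if labels.any (fun label => PySem.Str.isIn "Botnet" label) then 2
  else if labels.any (fun label =>
    PySem.Str.isIn "LEGITIMATE" label || PySem.Str.isIn "normal" (PySem.Str.lower label)
      || PySem.Str.isIn "Normal" label || PySem.Str.isIn "From-Normal" label) then 1
  else 0

theorem pvGen_cons (p q r : String → Bool) (l : String) (rest : List String) :
    (if (l :: rest).any p then 3 else if (l :: rest).any q then 2
      else if (l :: rest).any r then 1 else 0)
    = max (if p l then 3 else if q l then 2 else if r l then 1 else 0)
          (if rest.any p then 3 else if rest.any q then 2 else if rest.any r then 1 else 0) := by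
  simp only [List.any_cons]
  by_cases hp : p l = true <;> by_cases hq : q l = true <;> by_cases hr : r l = true <;>
  by_cases hp' : rest.any p = true <;> by_cases hq' : rest.any q = true <;>
  by_cases hr' : rest.any r = true <;>
  simp [hp, hq, hr, hp', hq', hr']

theorem pvR_cons (l : String) (rest : List String) :
    pvR (l :: rest) = max (pvRank l) (pvR rest) :=
  pvGen_cons _ _ _ l rest

theorem pvFoldl_best (labels : List String) :
    ∀ m, labels.foldl (fun a l => max a (pvRank l)) m = max m (pvR labels) := by
  induction labels with
  | nil => intro m; simp [pvR]
  | cons l rest ih =>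
      intro m
      rw [List.foldl_cons, ih, pvR_cons]
      omega

-- ===== VERDICT (by name: the statement is the Claim_ definition above) =====
theorem classify_session_label_py_spec : Claim_equal_classify_session_label_py := by
  intro labels _
  unfold Spec_classify_session_label_py classify_session_label_py classify_session_label_py_alt
  rw [pvFoldl_best]
  simp only [Nat.zero_max, pvR]
  cases h1 : labels.any (fun label => PySem.Str.isIn "CC" label || PySem.Str.isIn "C&C" label) <;>
  cases h2 : labels.any (fun label => PySem.Str.isIn "Botnet" label) <;>
  cases h3 : labels.any (fun label =>
    PySem.Str.isIn "LEGITIMATE" label || PySem.Str.isIn "normal" (PySem.Str.lower label)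
      || PySem.Str.isIn "Normal" label || PySem.Str.isIn "From-Normal" label) <;>
  (try simp only [h1, h2, h3]) <;> rfl
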